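-- pv_equiv track=rewrite | github.com/matheus-brant/ProjetoP1 | Usuarios.py | recuperaData
-- ===== SOURCE A (Python) =====
-- def recuperaData(linha):
--     '''
--     Recupera os caracteres de um arquivo que estejam antes da string "." e
--     armazenam o valor na variável data, retornando ela ao final.
--     '''
--     data = ''
--     for c in linha:
--         if c == ' ':
--             data = ''
--         elif c!= ' ' and c!= '.':
--             data += c
--     return data
-- ===== SOURCE B (Python) =====
-- def recuperaData(linha):
--     return linha.split(' ')[-1].replace('.', '')
-- ===== Notes on version B (the rewrite author's own statement) =====
-- stated objective: idiomatic
-- what changed: Replaces the character-by-character accumulator loop (reset on space, skip dots) with string operations: take the last space-delimited token via split(' ')[-1] and strip dots with replace('.', '').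
import Mathlib
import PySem

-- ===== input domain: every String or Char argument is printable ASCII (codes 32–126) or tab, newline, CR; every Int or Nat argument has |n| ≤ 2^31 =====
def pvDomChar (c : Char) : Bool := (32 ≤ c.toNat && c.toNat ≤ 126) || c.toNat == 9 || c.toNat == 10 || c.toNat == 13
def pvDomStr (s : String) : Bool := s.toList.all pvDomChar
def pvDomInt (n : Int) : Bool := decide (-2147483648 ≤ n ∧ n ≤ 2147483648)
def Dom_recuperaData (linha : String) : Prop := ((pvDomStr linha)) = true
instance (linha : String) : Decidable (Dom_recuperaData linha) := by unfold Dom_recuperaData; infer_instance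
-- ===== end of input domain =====

-- B computes the same result with string operations (split on ' ', take the last piece, drop dots)
-- instead of A's character loop; objective: idiomatic, same behaviour on all strings.


-- ===== PORT A =====
-- one loop iteration: reset on ' ', append anything that is neither ' ' nor '.'
def recuperaDataStep (data : List Char) (c : Char) : List Char :=
  if c = ' ' then []
  else if c ≠ ' ' ∧ c ≠ '.' then data ++ [c]
  else data

def recuperaData (linha : String) : String :=
  String.ofList (linha.toList.foldl recuperaDataStep [])

-- ===== PORT B =====
-- linha.split(' ')[-1].replace('.', ''): split(' ') is List.splitOn ' ', [-1] is pyGetD (-1),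
-- replace('.', '') on a single char removes every '.'
def recuperaData_alt (linha : String) : String :=
  String.ofList ((PySem.List.pyGetD (linha.toList.splitOn ' ') (-1) []).filter (fun c => c != '.'))

-- ===== PRECONDITION & SPEC =====
def Spec_recuperaData (linha : String) (out : String) : Prop := out = recuperaData_alt linha
instance (linha : String) (out : String) : Decidable (Spec_recuperaData linha out) := by unfold Spec_recuperaData; infer_instance

-- ===== CLAIM (what is proved, stated in full; the proofs are below) =====
def Claim_equal_recuperaData : Prop := ∀ (linha : String), Dom_recuperaData linha → Spec_recuperaData linha (recuperaData linha)

-- ===== LEMMAS AND PROOFS =====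

theorem splitOnP_of_not_mem (t : List Char) (h : ' ' ∉ t) :
    t.splitOnP (· == ' ') = [t] := by
  induction t with
  | nil => simp [List.splitOnP_nil]
  | cons c t ih =>
    have hc : c ≠ ' ' := fun hc => h (hc ▸ List.mem_cons_self)
    have ht : ' ' ∉ t := fun ht => h (List.mem_cons_of_mem _ ht)
    simp [List.splitOnP_cons, hc, ih ht]

theorem two_le_splitOnP_of_mem (t : List Char) (h : ' ' ∈ t) :
    2 ≤ (t.splitOnP (· == ' ')).length := by
  induction t with
  | nil => simp at h
  | cons c t ih =>
    by_cases hc : c = ' '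
    · have hpos : 0 < (t.splitOnP (· == ' ')).length :=
        List.length_pos_of_ne_nil (List.splitOnP_ne_nil (· == ' ') t)
      simp [List.splitOnP_cons, hc]
      omega
    · have ht : ' ' ∈ t := by
        rcases List.mem_cons.mp h with h1 | h1
        · exact absurd h1.symm hc
        · exact h1
      have h2 := ih ht
      cases hs : t.splitOnP (· == ' ') with
      | nil => exact absurd hs (List.splitOnP_ne_nil _ t)
      | cons p ps =>
        rw [hs] at h2
        simp [List.splitOnP_cons, hc, hs]
        simpa using h2

theorem foldA_eq (cs : List Char) (d : List Char) :
    cs.foldl recuperaDataStep d =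
      (if ' ' ∈ cs then [] else d) ++
        ((cs.splitOnP (· == ' ')).getLastD []).filter (fun c => c != '.') := by
  induction cs generalizing d with
  | nil => simp [List.splitOnP_nil]
  | cons c t ih =>
    by_cases hc : c = ' '
    · subst hc
      have hne := List.splitOnP_ne_nil (· == ' ') t
      rw [List.foldl_cons, ih]
      have hstep : recuperaDataStep d ' ' = [] := by simp [recuperaDataStep]
      rw [hstep, List.splitOnP_cons, if_pos (by decide : ((' ' == ' ') = true)),
        List.getLastD_cons, if_pos (List.mem_cons_self), List.nil_append,
        ite_self, List.nil_append]
    · have hcb : ¬((c == ' ') = true) := by simp [hc]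
      by_cases ht : ' ' ∈ t
      · have hmem : ' ' ∈ c :: t := List.mem_cons_of_mem _ ht
        have h2 := two_le_splitOnP_of_mem t ht
        cases hs : t.splitOnP (· == ' ') with
        | nil => exact absurd hs (List.splitOnP_ne_nil _ t)
        | cons p ps =>
          cases ps with
          | nil => rw [hs] at h2; simp at h2
          | cons q qs =>
            rw [List.foldl_cons, ih, if_pos ht, List.nil_append,
              List.splitOnP_cons, if_neg hcb, hs]
            rw [if_pos hmem, List.nil_append]
            simp only [List.modifyHead, List.getLastD_cons]
      · have hmem : ' ' ∉ c :: t := by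
          intro h; rcases List.mem_cons.mp h with h1 | h1
          · exact hc h1.symm
          · exact ht h1
        rw [List.foldl_cons, ih, if_neg ht,
          List.splitOnP_cons, if_neg hcb, splitOnP_of_not_mem t ht]
        rw [if_neg hmem]
        simp only [List.modifyHead, List.getLastD_cons, List.getLastD_nil]
        by_cases hd : c = '.'
        · subst hd
          simp [recuperaDataStep, hc]
        · simp [recuperaDataStep, hc, hd]

-- ===== VERDICT (by name: the statement is the Claim_ definition above) =====
theorem recuperaData_spec : Claim_equal_recuperaData := by
  intro linha _
  unfold Spec_recuperaData recuperaData recuperaData_alt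
  cases hs : linha.toList.splitOn ' ' with
  | nil => exact absurd hs (by simpa [List.splitOn] using List.splitOnP_ne_nil (· == ' ') linha.toList)
  | cons p ps =>
    have hps : linha.toList.splitOnP (· == ' ') = p :: ps := by
      simpa [List.splitOn] using hs
    rw [foldA_eq, hps, ite_self, List.nil_append,
      PySem.List.pyGetD_neg_one (p :: ps) [] (by simp)]
    rw [List.getLast_eq_getLastD, List.getLastD_cons]
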